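-- pv_equiv track=rewrite | github.com/gavinjackson/bsides--ctf | comprehensive_solver.py | check_skateboard_canine_constraint
-- ===== SOURCE A (Python) =====
-- SKATEBOARD_CANINE_POSITIONS = [7,11,15,16,20,23,31,37,47,56,70,71,80,90,104,113]
--
-- SKATEBOARD_CANINE = "SKATEBOARDCANINE"
--
-- def check_skateboard_canine_constraint(solution_string):
--     """Check if the solution satisfies the SKATEBOARD+CANINE constraint"""
--     extracted = ""
--     for pos in SKATEBOARD_CANINE_POSITIONS:
--         if pos < len(solution_string):
--             extracted += solution_string[pos]
--         else:
--             return False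
--
--     return extracted == SKATEBOARD_CANINE
-- ===== SOURCE B (Python) =====
-- SKATEBOARD_CANINE_POSITIONS = [7,11,15,16,20,23,31,37,47,56,70,71,80,90,104,113]
--
-- SKATEBOARD_CANINE = "SKATEBOARDCANINE"
--
-- MIN_LEN = max(SKATEBOARD_CANINE_POSITIONS) + 1  # 114
--
-- def check_skateboard_canine_constraint(solution_string):
--     """Check if the solution satisfies the SKATEBOARD+CANINE constraint"""
--     if len(solution_string) < MIN_LEN:
--         return False
--     return all(solution_string[p] == c
--                for p, c in zip(SKATEBOARD_CANINE_POSITIONS, SKATEBOARD_CANINE))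
-- ===== Notes on version B (the rewrite author's own statement) =====
-- stated objective: simpler
-- what changed: B hoists the per-position bounds check out of the loop into one upfront length guard (len >= max position + 1) and then compares the indexed characters element-wise with all(), instead of A's interleaved per-element bounds check with incremental string accumulation and a final whole-string comparison.
import Mathlib
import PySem

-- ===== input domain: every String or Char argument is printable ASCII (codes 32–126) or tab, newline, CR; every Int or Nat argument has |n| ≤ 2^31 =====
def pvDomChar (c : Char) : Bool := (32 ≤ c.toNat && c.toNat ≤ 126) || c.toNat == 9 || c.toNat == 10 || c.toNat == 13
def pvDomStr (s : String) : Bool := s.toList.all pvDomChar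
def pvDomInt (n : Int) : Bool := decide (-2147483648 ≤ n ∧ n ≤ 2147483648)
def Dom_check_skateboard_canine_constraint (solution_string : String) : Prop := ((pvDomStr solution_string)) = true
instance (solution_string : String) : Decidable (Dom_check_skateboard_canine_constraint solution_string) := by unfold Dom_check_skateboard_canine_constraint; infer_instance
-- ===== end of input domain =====

-- B replaces A's interleaved per-position bounds check + string accumulation by one
-- upfront length guard followed by an element-wise all() comparison (objective: simpler).

-- ===== PORT A =====
def skPositions : List Int := [7,11,15,16,20,23,31,37,47,56,70,71,80,90,104,113]

def skTarget : List Char := "SKATEBOARDCANINE".toList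

-- A's loop: per position, bounds check, append the character (pyGetD is exact here:
-- the guard ensures the index is nonnegative and in range); final whole-string comparison.
def skLoopA (cs : List Char) : List Int → List Char → Bool
  | [], extracted => extracted == skTarget
  | pos :: rest, extracted =>
    if pos < (cs.length : Int) then
      skLoopA cs rest (extracted ++ [PySem.List.pyGetD cs pos ' '])
    else
      false

def check_skateboard_canine_constraint (solution_string : String) : Bool :=
  skLoopA solution_string.toList skPositions []

-- ===== PORT B =====
-- MIN_LEN = max(positions) + 1 = 114; length guard, then element-wise comparison.
def check_skateboard_canine_constraint_alt (solution_string : String) : Bool :=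
  let cs := solution_string.toList
  if cs.length < 114 then false
  else (skPositions.zip skTarget).all
        (fun pc => PySem.List.pyGet? cs pc.1 == some pc.2)

-- ===== PRECONDITION & SPEC =====
def Spec_check_skateboard_canine_constraint (solution_string : String) (out : Bool) : Prop := out = check_skateboard_canine_constraint_alt solution_string
instance (solution_string : String) (out : Bool) : Decidable (Spec_check_skateboard_canine_constraint solution_string out) := by unfold Spec_check_skateboard_canine_constraint; infer_instance

-- ===== CLAIM (what is proved, stated in full; the proofs are below) =====
def Claim_equal_check_skateboard_canine_constraint : Prop := ∀ (solution_string : String), Dom_check_skateboard_canine_constraint solution_string → Spec_check_skateboard_canine_constraint solution_string (check_skateboard_canine_constraint solution_string)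

-- ===== LEMMAS AND PROOFS =====

-- A's loop returns false as soon as some position is out of range.
theorem skLoopA_false (cs : List Char) (ps : List Int) (ext : List Char)
    (h : ∃ p ∈ ps, ¬ p < (cs.length : Int)) : skLoopA cs ps ext = false := by
  induction ps generalizing ext with
  | nil => simp at h
  | cons p rest ih =>
    rcases h with ⟨q, hq, hqn⟩
    rcases List.mem_cons.mp hq with rfl | hq'
    · simp [skLoopA, hqn]
    · by_cases hp : p < (cs.length : Int)
      · simp [skLoopA, hp]; exact ih _ ⟨q, hq', hqn⟩
      · simp [skLoopA, hp]

-- When every position is in range, A's loop is the accumulated map compared to the target.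
theorem skLoopA_all (cs : List Char) (ps : List Int) (ext : List Char)
    (h : ∀ p ∈ ps, p < (cs.length : Int)) :
    skLoopA cs ps ext =
      ((ext ++ ps.map (fun p => PySem.List.pyGetD cs p ' ')) == skTarget) := by
  induction ps generalizing ext with
  | nil => simp [skLoopA]
  | cons p rest ih =>
    have hp : p < (cs.length : Int) := h p (List.mem_cons_self ..)
    simp only [skLoopA, hp, if_pos, List.map_cons]
    rw [ih _ (fun q hq => h q (List.mem_cons_of_mem _ hq))]
    simp [List.append_assoc]

-- Comparing a mapped list with a target elementwise (equal lengths).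
theorem map_beq_zip_all {α β : Type} [BEq β] (g : α → β) :
    ∀ (xs : List α) (ys : List β), xs.length = ys.length →
      ((xs.map g) == ys) = (xs.zip ys).all (fun pc => g pc.1 == pc.2)
  | [], [], _ => rfl
  | [], _ :: _, h => by simp at h
  | _ :: _, [], h => by simp at h
  | x :: xs, y :: ys, h => by
    rw [List.map_cons, List.cons_beq_cons, List.zip_cons_cons, List.all_cons,
      map_beq_zip_all g xs ys (by simpa using h)]

-- all is determined by the values of the predicate on members.
theorem all_congr_mem {α : Type} {l : List α} {p q : α → Bool}
    (h : ∀ a ∈ l, p a = q a) : l.all p = l.all q := by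
  induction l with
  | nil => rfl
  | cons x xs ih =>
    simp only [List.all_cons, h x (List.mem_cons_self ..),
      ih (fun a ha => h a (List.mem_cons_of_mem _ ha))]

theorem skateboard_agree (cs : List Char) :
    skLoopA cs skPositions [] =
      (if cs.length < 114 then false
       else (skPositions.zip skTarget).all
             (fun pc => PySem.List.pyGet? cs pc.1 == some pc.2)) := by
  by_cases hn : cs.length < 114
  · rw [if_pos hn]
    exact skLoopA_false cs _ _ ⟨113, by simp [skPositions], by omega⟩
  · rw [if_neg hn]
    have hlen : 114 ≤ cs.length := by omega
    have hmem : ∀ p ∈ skPositions, 0 ≤ p ∧ p < (cs.length : Int) := by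
      intro p hp
      simp only [skPositions, List.mem_cons, List.not_mem_nil, or_false] at hp
      rcases hp with rfl|rfl|rfl|rfl|rfl|rfl|rfl|rfl|rfl|rfl|rfl|rfl|rfl|rfl|rfl|rfl <;>
        exact ⟨by norm_num, by omega⟩
    rw [skLoopA_all cs _ _ (fun p hp => (hmem p hp).2), List.nil_append,
      map_beq_zip_all _ _ _ (by simp [skPositions, skTarget])]
    apply all_congr_mem
    intro pc hpc
    have hp1 : pc.1 ∈ skPositions := (List.of_mem_zip hpc).1
    have := hmem pc.1 hp1
    rw [PySem.List.pyGet?_eq_some_getElem cs this.1 this.2,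
      PySem.List.pyGetD_eq_getElem cs ' ' this.1 this.2, Option.some_beq_some]

-- ===== VERDICT (by name: the statement is the Claim_ definition above) =====
theorem check_skateboard_canine_constraint_spec : Claim_equal_check_skateboard_canine_constraint := by
  intro s _
  unfold Spec_check_skateboard_canine_constraint check_skateboard_canine_constraint check_skateboard_canine_constraint_alt
  exact skateboard_agree s.toList
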